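-- pv_equiv track=rewrite | github.com/Lecrut/Diffusion-code-generation | data/code/38_1_2.py | find_repeated_letters
-- ===== SOURCE A (Python) =====
-- def find_repeated_letters(text):
--     letter_counts = {}
--     for char in text:
--         if 'a' <= char <= 'z':
--             letter_counts[char] = letter_counts.get(char, 0) + 1
--         elif 'A' <= char <= 'Z':
--             letter_counts[char.lower()] = letter_counts.get(char.lower(), 0) + 1
--     repeated_letters = set()
--     for letter, count in letter_counts.items():
--         if count > 1:
--             repeated_letters.add(letter)
--     return repeated_letters
-- ===== SOURCE B (Python) =====
-- def find_repeated_letters(text):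
--     letters = [c.lower() for c in text if 'a' <= c <= 'z' or 'A' <= c <= 'Z']
--     return {c for i, c in enumerate(letters) if c in letters[i + 1:]}
-- ===== Notes on version B (the rewrite author's own statement) =====
-- stated objective: alternative
-- what changed: Removes A's count dictionary and its second filtering pass entirely: B normalizes the letters once and collects, in a single comprehension, every letter that occurs again later in the list (membership test in the remaining suffix), so no counts are ever maintained.
import Mathlib
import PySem

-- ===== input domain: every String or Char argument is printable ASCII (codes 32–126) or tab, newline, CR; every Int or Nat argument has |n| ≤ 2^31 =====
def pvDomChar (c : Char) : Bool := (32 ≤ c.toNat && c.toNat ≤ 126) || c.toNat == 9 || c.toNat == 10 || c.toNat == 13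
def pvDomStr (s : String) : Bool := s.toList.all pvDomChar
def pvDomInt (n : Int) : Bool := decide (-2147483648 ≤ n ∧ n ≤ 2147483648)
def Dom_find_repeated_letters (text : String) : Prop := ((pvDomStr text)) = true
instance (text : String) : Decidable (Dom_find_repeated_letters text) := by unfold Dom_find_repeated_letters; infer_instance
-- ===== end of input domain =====

-- B drops A's count dictionary and its second filtering pass: it collects, in one
-- comprehension, every normalized letter that occurs again later in the letter list
-- (objective: simpler).

-- ===== PORT A =====
def find_repeated_letters (text : String) : List String :=
  let letter_counts : PySem.Dict Char Int :=
    text.toList.foldl (fun d char =>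
      if 'a' ≤ char ∧ char ≤ 'z' then
        d.insert char (d.getD char 0 + 1)
      else if 'A' ≤ char ∧ char ≤ 'Z' then
        d.insert (PySem.Chars.lowerChar char) (d.getD (PySem.Chars.lowerChar char) 0 + 1)
      else d) PySem.Dict.empty
  let repeated_letters : PySem.Set Char :=
    letter_counts.items.foldl (fun s p => if p.2 > 1 then PySem.Set.add s p.1 else s) PySem.Set.empty
  repeated_letters.map (fun c => String.mk [c])

-- ===== PORT B =====
def find_repeated_letters_alt (text : String) : List String :=
  let letters : List Char :=
    (text.toList.filter (fun c => decide (('a' ≤ c ∧ c ≤ 'z') ∨ ('A' ≤ c ∧ c ≤ 'Z')))).map PySem.Chars.lowerChar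
  (PySem.Set.ofList (((PySem.List.enumerate letters).filter
      (fun p => decide (p.2 ∈ PySem.List.slice letters (some (p.1 + 1)) none))).map Prod.snd)).map
    (fun c => String.mk [c])

-- ===== PRECONDITION & SPEC =====
def Spec_find_repeated_letters (text : String) (out : List String) : Prop := out = find_repeated_letters_alt text
instance (text : String) (out : List String) : Decidable (Spec_find_repeated_letters text out) := by unfold Spec_find_repeated_letters; infer_instance

-- ===== CLAIM (what is proved, stated in full; the proofs are below) =====
def Claim_equal_find_repeated_letters : Prop := ∀ (text : String), Dom_find_repeated_letters text → Spec_find_repeated_letters text (find_repeated_letters text)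

-- ===== LEMMAS AND PROOFS =====

theorem lowerChar_of_lower {c : Char} (h : 'a' ≤ c ∧ c ≤ 'z') : PySem.Chars.lowerChar c = c := by
  have h2 : ¬ c ≤ 'Z' := fun hc => absurd (le_trans h.1 hc) (by decide)
  simp [PySem.Chars.lowerChar, PySem.Chars.isupper, h2]

theorem set_add_filter {α : Type} [BEq α] [LawfulBEq α] (p : α → Bool) (acc : PySem.Set α) (x : α) :
    (PySem.Set.add acc x).filter p = if p x then PySem.Set.add (acc.filter p) x else acc.filter p := by
  by_cases hm : x ∈ acc <;> by_cases hp : p x <;>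
    simp [PySem.Set.add, List.mem_filter, hm, hp, List.filter_append]

theorem foldl_add_filter {α : Type} [BEq α] [LawfulBEq α] (p : α → Bool) :
    ∀ (xs : List α) (acc : PySem.Set α),
      (xs.foldl PySem.Set.add acc).filter p = (xs.filter p).foldl PySem.Set.add (acc.filter p)
  | [], acc => rfl
  | x :: xs, acc => by
    simp only [List.foldl_cons, List.filter_cons]
    rw [foldl_add_filter p xs, set_add_filter]
    by_cases hp : p x <;> simp [hp]

theorem filter_ofList {α : Type} [BEq α] [LawfulBEq α] (p : α → Bool) (xs : List α) :
    (PySem.Set.ofList xs).filter p = PySem.Set.ofList (xs.filter p) := by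
  simpa using foldl_add_filter p xs []

theorem foldl_add_of_nodup {α : Type} [BEq α] [LawfulBEq α] :
    ∀ (ys : List α) (acc : PySem.Set α), (∀ y ∈ ys, y ∉ acc) → ys.Nodup →
      ys.foldl PySem.Set.add acc = acc ++ ys
  | [], acc, _, _ => by simp
  | y :: ys, acc, hdisj, hnd => by
    have hy : y ∉ acc := hdisj y (by simp)
    simp only [List.foldl_cons, PySem.Set.add]
    rw [if_neg (by simpa using hy)]
    rw [foldl_add_of_nodup ys (acc ++ [y])
      (by intro z hz
          simp only [List.mem_append, List.mem_singleton, not_or]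
          exact ⟨hdisj z (by simp [hz]), fun h => (List.nodup_cons.mp hnd).1 (h ▸ hz)⟩)
      (List.nodup_cons.mp hnd).2]
    simp

-- Proof-side recursion describing B's comprehension: the letters having a later occurrence.
def pvFF : List Char → List Char
  | [] => []
  | x :: xs => if x ∈ xs then x :: pvFF xs else pvFF xs

theorem enum_filter_eq (letters : List Char) :
    ∀ (s : Nat) (xs : List Char), letters.drop s = xs →
      ((PySem.List.enumerate xs (s : Int)).filter
          (fun p => decide (p.2 ∈ PySem.List.slice letters (some (p.1 + 1)) none))).map Prod.snd
        = pvFF xs := by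
  intro s xs
  induction xs generalizing s with
  | nil => intro _; rfl
  | cons x xs ih =>
    intro hdrop
    have hdrop' : letters.drop (s + 1) = xs := by
      rw [← List.tail_drop, hdrop]; rfl
    have hcast1 : (s : Int) + 1 = ((s + 1 : Nat) : Int) := by push_cast; ring
    have hslice : PySem.List.slice letters (some (((s + 1 : Nat) : Int))) none = xs := by
      rw [PySem.List.slice_from_natCast, hdrop']
    rw [PySem.List.enumerate_cons, List.filter_cons]
    have key : ((PySem.List.enumerate xs ((s : Int) + 1)).filter
        (fun p => decide (p.2 ∈ PySem.List.slice letters (some (p.1 + 1)) none))).map Prod.snd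
        = pvFF xs := by
      rw [hcast1]; exact ih (s + 1) hdrop'
    simp only [hcast1, hslice]
    by_cases hx : x ∈ xs <;> simp [hx, pvFF, key]

theorem foldl_add_skip_mem {α : Type} [BEq α] [LawfulBEq α] (x : α) :
    ∀ (M : List α) (acc : PySem.Set α), x ∈ acc →
      M.foldl PySem.Set.add acc = (M.filter (fun c => !(c == x))).foldl PySem.Set.add acc
  | [], _, _ => rfl
  | y :: M, acc, hx => by
    by_cases hyx : y = x
    · subst hyx
      rw [List.filter_cons, if_neg (by simp)]
      rw [List.foldl_cons, PySem.Set.add_of_mem hx]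
      exact foldl_add_skip_mem y M acc hx
    · rw [List.filter_cons, if_pos (by simpa using hyx)]
      rw [List.foldl_cons, List.foldl_cons]
      exact foldl_add_skip_mem x M _ (by simp [PySem.Set.mem_add, hx])

theorem pvFF_foldl : ∀ (L : List Char) (acc : PySem.Set Char),
    (pvFF L).foldl PySem.Set.add acc
      = (L.filter (fun c => decide (L.count c > 1))).foldl PySem.Set.add acc
  | [], _ => rfl
  | x :: xs, acc => by
    by_cases hx : x ∈ xs
    · have hcx : decide ((x :: xs).count x > 1) = true := by
        have := List.count_pos_iff.mpr hx
        simp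
        omega
      rw [pvFF, if_pos hx, List.filter_cons, if_pos hcx]
      rw [List.foldl_cons, List.foldl_cons]
      have hmem : x ∈ PySem.Set.add acc x := by simp [PySem.Set.mem_add]
      rw [pvFF_foldl xs (PySem.Set.add acc x)]
      rw [foldl_add_skip_mem x (xs.filter (fun c => decide (xs.count c > 1))) _ hmem,
          foldl_add_skip_mem x (xs.filter (fun c => decide ((x :: xs).count c > 1))) _ hmem]
      rw [List.filter_filter, List.filter_filter]
      congr 1
      apply List.filter_congr
      intro c _
      by_cases hcxx : c = x
      · subst hcxx; simp
      · have hxc : x ≠ c := fun h => hcxx h.symm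
        simp [hxc]
    · have hcx : decide ((x :: xs).count x > 1) = false := by
        have : xs.count x = 0 := List.count_eq_zero.mpr hx
        simp [this]
      rw [pvFF, if_neg hx, List.filter_cons, if_neg (by rw [hcx]; simp)]
      rw [pvFF_foldl xs acc]
      congr 1
      apply List.filter_congr
      intro c hc
      have hxc : x ≠ c := fun h => hx (h ▸ hc)
      simp [hxc]

theorem ports_agree (text : String) : find_repeated_letters text = find_repeated_letters_alt text := by
  unfold find_repeated_letters find_repeated_letters_alt
  have hdict : text.toList.foldl (fun d char =>
      if 'a' ≤ char ∧ char ≤ 'z' then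
        d.insert char (d.getD char 0 + 1)
      else if 'A' ≤ char ∧ char ≤ 'Z' then
        d.insert (PySem.Chars.lowerChar char) (d.getD (PySem.Chars.lowerChar char) 0 + 1)
      else d) PySem.Dict.empty
      = PySem.Dict.counter ((text.toList.filter
          (fun c => decide (('a' ≤ c ∧ c ≤ 'z') ∨ ('A' ≤ c ∧ c ≤ 'Z')))).map PySem.Chars.lowerChar) := by
    rw [PySem.List.foldl_congr_mem _ _
      (fun d char => if ('a' ≤ char ∧ char ≤ 'z') ∨ ('A' ≤ char ∧ char ≤ 'Z') then
        d.insert (PySem.Chars.lowerChar char) (d.getD (PySem.Chars.lowerChar char) 0 + 1)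
      else d) _ ?_]
    · rw [PySem.List.foldl_ite_eq_foldl_filter,
        ← List.foldl_map (f := PySem.Chars.lowerChar)
          (g := fun (d : PySem.Dict Char Int) x => d.insert x (d.getD x 0 + 1)),
        PySem.Dict.foldl_insert_getD_add_one_eq_counter]
    · intro acc x hx
      dsimp only
      by_cases h1 : 'a' ≤ x ∧ x ≤ 'z'
      · rw [if_pos h1, if_pos (Or.inl h1), lowerChar_of_lower h1]
      · by_cases h2 : 'A' ≤ x ∧ x ≤ 'Z'
        · rw [if_neg h1, if_pos h2, if_pos (Or.inr h2)]
        · rw [if_neg h1, if_neg h2, if_neg (by tauto)]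
  rw [hdict]
  dsimp only
  set L : List Char := (text.toList.filter
      (fun c => decide (('a' ≤ c ∧ c ≤ 'z') ∨ ('A' ≤ c ∧ c ≤ 'Z')))).map PySem.Chars.lowerChar with hL
  -- A side: the items loop keeps exactly the letters with count > 1, in first-occurrence order.
  rw [PySem.Dict.items_counter, List.foldl_map]
  dsimp only
  rw [PySem.List.foldl_ite_eq_foldl_filter (p := fun k => ((List.count k L : Int) > 1))
    (f := PySem.Set.add)]
  have hcast : (fun k => decide ((List.count k L : Int) > 1))
      = (fun c => decide (L.count c > 1)) := by
    funext k; simp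
  rw [hcast]
  rw [foldl_add_of_nodup _ PySem.Set.empty (by simp [PySem.Set.empty])
      ((PySem.Set.nodup_ofList _).filter _)]
  rw [filter_ofList]
  -- B side: the comprehension is pvFF L folded into a set, which builds the same list.
  have hB := enum_filter_eq L 0 L (by simp)
  norm_num at hB
  rw [hB]
  conv_rhs => rw [PySem.Set.ofList_eq_foldl, pvFF_foldl L []]
  simp only [PySem.Set.empty, List.nil_append, PySem.Set.ofList_eq_foldl]

-- ===== VERDICT (by name: the statement is the Claim_ definition above) =====
theorem find_repeated_letters_spec : Claim_equal_find_repeated_letters := by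
  intro text _
  unfold Spec_find_repeated_letters
  exact ports_agree text
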